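-- pv_equiv track=rewrite | github.com/pypi-data/pypi-mirror-351 | packages/deriva-ml/deriva_ml-1.13.3.tar.gz/deriva_ml-1.13.3/src/deriva_ml/history.py | urlb32_encode
-- ===== SOURCE A (Python) =====
-- def urlb32_encode(i):
--     """Encode integer as per ERMrest's base-32 snapshot encoding"""
--     if i > 2**63 - 1:
--         raise ValueError(i)
--     elif i < -(2**63):
--         raise ValueError(i)
--
--     # pad 64 bit to 65 bits for 13 5-bit digits
--     raw = i << 1
--     encoded_rev = []
--     for d in range(1, 14):
--         if d > 2 and ((d - 1) % 4) == 0: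
--             encoded_rev.append("-")
--         code = "0123456789ABCDEFGHJKMNPQRSTVWXYZ"[raw % 32]
--         encoded_rev.append(code)
--         raw = raw // 32
--
--     while encoded_rev and encoded_rev[-1] in {"0", "-"}:
--         del encoded_rev[-1]
--
--     if not encoded_rev:
--         encoded_rev = ["0"]
--
--     encoded = reversed(encoded_rev)
--
--     return "".join(encoded)
-- ===== SOURCE B (Python) =====
-- def urlb32_encode(i):
--     """Encode integer as per ERMrest's base-32 snapshot encoding"""
--     if i > 2**63 - 1:
--         raise ValueError(i)
--     elif i < -(2**63):
--         raise ValueError(i)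
--
--     raw = i << 1
--     digits = []
--     for _ in range(13):
--         digits.append("0123456789ABCDEFGHJKMNPQRSTVWXYZ"[raw % 32])
--         raw //= 32
--     s = "".join(reversed(digits)).lstrip("0") or "0"
--     groups = []
--     n = len(s)
--     while n > 4:
--         groups.append(s[n - 4:n])
--         n -= 4
--     groups.append(s[:n])
--     return "-".join(reversed(groups))
-- ===== Notes on version B (the rewrite author's own statement) =====
-- stated objective: simpler
-- what changed: B computes the 13 base-32 digits in a plain loop, then formats separately: lstrip the leading zeros and regroup into dash-separated chunks of four counted from the right, instead of A's interleaved '-' insertion during digit generation followed by a combined trailing strip of '0' and '-'.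
import Mathlib
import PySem

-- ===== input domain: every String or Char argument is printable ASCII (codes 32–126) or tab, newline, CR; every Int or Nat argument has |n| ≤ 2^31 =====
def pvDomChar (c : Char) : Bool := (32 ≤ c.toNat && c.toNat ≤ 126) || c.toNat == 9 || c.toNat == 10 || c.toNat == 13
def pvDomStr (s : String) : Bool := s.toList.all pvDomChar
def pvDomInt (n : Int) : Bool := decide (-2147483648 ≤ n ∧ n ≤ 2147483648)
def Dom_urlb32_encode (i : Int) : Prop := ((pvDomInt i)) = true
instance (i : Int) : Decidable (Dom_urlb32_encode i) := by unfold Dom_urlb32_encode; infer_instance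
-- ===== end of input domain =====

-- B separates digit computation (one base-32 loop) from formatting (lstrip + group-by-4
-- from the right), instead of A's interleaved '-' insertion and trailing strip; objective: simpler.

-- ===== PORT A =====
-- the base-32 digit alphabet "0123456789ABCDEFGHJKMNPQRSTVWXYZ" as a char list
def pvTbl : List Char :=
  ['0','1','2','3','4','5','6','7','8','9','A','B','C','D','E','F','G','H','J','K','M','N','P','Q','R','S','T','V','W','X','Y','Z']

-- `while encoded_rev and encoded_rev[-1] in {"0","-"}: del encoded_rev[-1]` — pops the last
-- element while it is '0' or '-'; exact transcription of the while loop.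
def pvStripA (l : List Char) : List Char :=
  if h : l ≠ [] ∧ (l.getLast? = some '0' ∨ l.getLast? = some '-') then pvStripA l.dropLast else l
termination_by l.length
decreasing_by
  simpa [List.length_dropLast] using Nat.sub_lt (List.length_pos_iff.mpr h.1) one_pos

-- The two ValueError guards (|i| beyond 64 bits) never fire on Dom (|i| ≤ 2^31), so the
-- port carries only the returning path.  `raw % 32` is always in [0,32), so the string
-- index is exact as List.getD.
def urlb32_encode (i : Int) : String :=
  let step := fun (st : Int × List Char) (d : Int) =>
    let enc := if d > 2 ∧ PySem.Int.mod (d - 1) 4 = 0 then st.2 ++ ['-'] else st.2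
    (PySem.Int.floordiv st.1 32, enc ++ [pvTbl.getD (PySem.Int.mod st.1 32).toNat '0'])
  let r := (PySem.List.pyRange 1 14 1).foldl step (i * 2, [])
  let enc := pvStripA r.2
  let enc := if enc.isEmpty then ['0'] else enc   -- `if not encoded_rev: encoded_rev = ["0"]`
  String.mk enc.reverse

-- ===== PORT B =====
-- `while n > 4: groups.append(s[n-4:n]); n -= 4` then the final `s[:n]`, groups joined
-- left-to-right (Source B reverses the collected list before joining).
def pvChunksR (s : List Char) : List (List Char) :=
  if s.length > 4 then pvChunksR (s.take (s.length - 4)) ++ [s.drop (s.length - 4)]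
  else [s]
termination_by s.length
decreasing_by simpa using by omega

def urlb32_encode_alt (i : Int) : String :=
  let step := fun (st : Int × List Char) (_ : Nat) =>
    (PySem.Int.floordiv st.1 32, st.2 ++ [pvTbl.getD (PySem.Int.mod st.1 32).toNat '0'])
  let r := (List.range 13).foldl step (i * 2, [])
  let s := r.2.reverse.dropWhile (· == '0')       -- lstrip("0")
  let s := if s.isEmpty then ['0'] else s         -- `or "0"`
  String.mk (List.intercalate ['-'] (pvChunksR s))

-- ===== PRECONDITION & SPEC =====
def Spec_urlb32_encode (i : Int) (out : String) : Prop := out = urlb32_encode_alt i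
instance (i : Int) (out : String) : Decidable (Spec_urlb32_encode i out) := by unfold Spec_urlb32_encode; infer_instance

-- ===== CLAIM (what is proved, stated in full; the proofs are below) =====
def Claim_equal_urlb32_encode : Prop := ∀ (i : Int), Dom_urlb32_encode i → Spec_urlb32_encode i (urlb32_encode i)

-- ===== LEMMAS AND PROOFS =====

theorem pvStripA_reverse (r : List Char) :
    pvStripA r.reverse = (r.dropWhile (fun c => c = '0' ∨ c = '-')).reverse := by
  induction r with
  | nil => rw [pvStripA]; simp
  | cons c r ih =>
      rw [List.reverse_cons, pvStripA]
      simp only [List.getLast?_concat, List.dropLast_concat, List.dropWhile_cons]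
      by_cases h : c = '0' ∨ c = '-'
      · rcases h with h | h <;> simp [h, ih]
      · push_neg at h
        simp [h.1, h.2]

theorem pvStripA_eq (l : List Char) :
    pvStripA l = (l.reverse.dropWhile (fun c => c = '0' ∨ c = '-')).reverse := by
  simpa using pvStripA_reverse l.reverse

-- every alphabet character differs from '-'
theorem pvTbl_ne_dash (n : Nat) (h : n < 32) : pvTbl.getD n '0' ≠ '-' := by
  interval_cases n <;> decide

theorem pvMod32_lt (r : Int) : (PySem.Int.mod r 32).toNat < 32 := by
  have he := PySem.Int.mod_eq_emod_of_pos (a := r) (b := 32) (by norm_num)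
  have h1 := Int.emod_nonneg r (show (32:Int) ≠ 0 by norm_num)
  have h2 := Int.emod_lt_of_pos r (show (0:Int) < 32 by norm_num)
  omega

-- the formatting lemma: for any 13 non-'-' digits (least significant c1 first),
-- A's strip-of-interleaved string equals B's lstrip-then-regroup string
theorem pvFmt (c1 c2 c3 c4 c5 c6 c7 c8 c9 c10 c11 c12 c13 : Char)
    (h1 : c1 ≠ '-') (h2 : c2 ≠ '-') (h3 : c3 ≠ '-') (h4 : c4 ≠ '-') (h5 : c5 ≠ '-')
    (h6 : c6 ≠ '-') (h7 : c7 ≠ '-') (h8 : c8 ≠ '-') (h9 : c9 ≠ '-') (h10 : c10 ≠ '-')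
    (h11 : c11 ≠ '-') (h12 : c12 ≠ '-') (h13 : c13 ≠ '-') :
    String.mk (let t := pvStripA [c1,c2,c3,c4,'-',c5,c6,c7,c8,'-',c9,c10,c11,c12,'-',c13];
               if t.isEmpty then ['0'] else t).reverse
    = (let s := List.dropWhile (· == '0') [c13,c12,c11,c10,c9,c8,c7,c6,c5,c4,c3,c2,c1];
       let s2 := if s.isEmpty then ['0'] else s;
       String.mk (List.intercalate ['-'] (pvChunksR s2))) := by
  rw [pvStripA_eq]
  by_cases e13 : c13 = '0'
  · by_cases e12 : c12 = '0'
    · by_cases e11 : c11 = '0'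
      · by_cases e10 : c10 = '0'
        · by_cases e9 : c9 = '0'
          · by_cases e8 : c8 = '0'
            · by_cases e7 : c7 = '0'
              · by_cases e6 : c6 = '0'
                · by_cases e5 : c5 = '0'
                  · by_cases e4 : c4 = '0'
                    · by_cases e3 : c3 = '0'
                      · by_cases e2 : c2 = '0'
                        · by_cases e1 : c1 = '0'
                          · simp [e13, e12, e11, e10, e9, e8, e7, e6, e5, e4, e3, e2, e1, pvChunksR, List.intercalate]
                          · simp [e13, e12, e11, e10, e9, e8, e7, e6, e5, e4, e3, e2, e1, h1, pvChunksR, List.intercalate]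
                        · simp [e13, e12, e11, e10, e9, e8, e7, e6, e5, e4, e3, e2, h2, pvChunksR, List.intercalate]
                      · simp [e13, e12, e11, e10, e9, e8, e7, e6, e5, e4, e3, h3, pvChunksR, List.intercalate]
                    · simp [e13, e12, e11, e10, e9, e8, e7, e6, e5, e4, h4, pvChunksR, List.intercalate]
                  · simp [e13, e12, e11, e10, e9, e8, e7, e6, e5, h5, pvChunksR, List.intercalate]
                · simp [e13, e12, e11, e10, e9, e8, e7, e6, h6, pvChunksR, List.intercalate]
              · simp [e13, e12, e11, e10, e9, e8, e7, h7, pvChunksR, List.intercalate]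
            · simp [e13, e12, e11, e10, e9, e8, h8, pvChunksR, List.intercalate]
          · simp [e13, e12, e11, e10, e9, h9, pvChunksR, List.intercalate]
        · simp [e13, e12, e11, e10, h10, pvChunksR, List.intercalate]
      · simp [e13, e12, e11, h11, pvChunksR, List.intercalate]
    · simp [e13, e12, h12, pvChunksR, List.intercalate]
  · simp [e13, h13, pvChunksR, List.intercalate]

-- ===== VERDICT (by name: the statement is the Claim_ definition above) =====
theorem urlb32_encode_spec : Claim_equal_urlb32_encode := by
  intro i _
  show urlb32_encode i = urlb32_encode_alt i
  have hr : PySem.List.pyRange 1 14 1 = [1,2,3,4,5,6,7,8,9,10,11,12,13] := by decide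
  have n1 : ¬((1:Int) > 2 ∧ PySem.Int.mod (1 - 1) 4 = 0) := by decide
  have n2 : ¬((2:Int) > 2 ∧ PySem.Int.mod (2 - 1) 4 = 0) := by decide
  have n3 : ¬((3:Int) > 2 ∧ PySem.Int.mod (3 - 1) 4 = 0) := by decide
  have n4 : ¬((4:Int) > 2 ∧ PySem.Int.mod (4 - 1) 4 = 0) := by decide
  have c5 : ((5:Int) > 2 ∧ PySem.Int.mod (5 - 1) 4 = 0) := by decide
  have n6 : ¬((6:Int) > 2 ∧ PySem.Int.mod (6 - 1) 4 = 0) := by decide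
  have n7 : ¬((7:Int) > 2 ∧ PySem.Int.mod (7 - 1) 4 = 0) := by decide
  have n8 : ¬((8:Int) > 2 ∧ PySem.Int.mod (8 - 1) 4 = 0) := by decide
  have c9 : ((9:Int) > 2 ∧ PySem.Int.mod (9 - 1) 4 = 0) := by decide
  have n10 : ¬((10:Int) > 2 ∧ PySem.Int.mod (10 - 1) 4 = 0) := by decide
  have n11 : ¬((11:Int) > 2 ∧ PySem.Int.mod (11 - 1) 4 = 0) := by decide
  have n12 : ¬((12:Int) > 2 ∧ PySem.Int.mod (12 - 1) 4 = 0) := by decide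
  have c13 : ((13:Int) > 2 ∧ PySem.Int.mod (13 - 1) 4 = 0) := by decide
  unfold urlb32_encode urlb32_encode_alt
  rw [hr]
  simp only [List.range, List.range.loop, List.foldl, n1, n2, n3, n4, c5, n6, n7, n8, c9,
    n10, n11, n12, c13, if_true, if_false, ite_true, ite_false, List.cons_append,
    List.nil_append]
  exact pvFmt _ _ _ _ _ _ _ _ _ _ _ _ _
    (pvTbl_ne_dash _ (pvMod32_lt _)) (pvTbl_ne_dash _ (pvMod32_lt _)) (pvTbl_ne_dash _ (pvMod32_lt _))
    (pvTbl_ne_dash _ (pvMod32_lt _)) (pvTbl_ne_dash _ (pvMod32_lt _)) (pvTbl_ne_dash _ (pvMod32_lt _))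
    (pvTbl_ne_dash _ (pvMod32_lt _)) (pvTbl_ne_dash _ (pvMod32_lt _)) (pvTbl_ne_dash _ (pvMod32_lt _))
    (pvTbl_ne_dash _ (pvMod32_lt _)) (pvTbl_ne_dash _ (pvMod32_lt _)) (pvTbl_ne_dash _ (pvMod32_lt _))
    (pvTbl_ne_dash _ (pvMod32_lt _))
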